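-- pv_equiv track=rewrite | github.com/genericgeekgirl/code-samples | map/map.py | get_bubble_color
-- ===== SOURCE A (Python) =====
-- def get_bubble_color(details):
--     colors = []
--
--     for airport in details:
--         values = list(details[airport].values())
--         for value in values:
--             colors.append(value[1])
--
--     if 'high' in colors:
--         return 'high'
--     elif 'medium' in colors:
--         return 'medium'
--     else:
--         return 'low'
-- ===== SOURCE B (Python) =====
-- def get_bubble_color(details):
--     rank = {'high': 2, 'medium': 1}
--     best = max((rank.get(value[1], 0)
--                 for airport in details
--                 for value in details[airport].values()),
--                default=0)
--     return ('low', 'medium', 'high')[best]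
-- ===== Notes on version B (the rewrite author's own statement) =====
-- stated objective: alternative
-- what changed: Replaces A's collect-every-tag-into-a-list plus three membership scans with a numeric priority max-reduction: each tag is mapped to a rank (high=2, medium=1, other=0), a single max over the nested values computes the best rank, and the answer is a table lookup by that rank.
import Mathlib
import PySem

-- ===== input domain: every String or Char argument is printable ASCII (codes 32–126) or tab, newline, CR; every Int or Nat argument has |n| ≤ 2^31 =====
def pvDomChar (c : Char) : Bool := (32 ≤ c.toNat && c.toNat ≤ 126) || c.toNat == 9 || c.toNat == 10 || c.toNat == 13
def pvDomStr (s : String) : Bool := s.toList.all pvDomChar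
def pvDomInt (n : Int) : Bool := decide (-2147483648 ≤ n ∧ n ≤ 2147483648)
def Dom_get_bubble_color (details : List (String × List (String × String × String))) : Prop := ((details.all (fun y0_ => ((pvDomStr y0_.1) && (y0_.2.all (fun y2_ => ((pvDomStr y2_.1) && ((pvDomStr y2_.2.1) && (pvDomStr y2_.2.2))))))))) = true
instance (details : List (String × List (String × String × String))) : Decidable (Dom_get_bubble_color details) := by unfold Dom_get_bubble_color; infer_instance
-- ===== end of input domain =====

-- B replaces A's collect-all-tags list + three membership scans by a numeric priority
-- max-reduction (high=2, medium=1, else 0) and a table lookup; same cost class (alternative).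

-- ===== PORT A =====
-- colors = []; for airport in details: for value in details[airport].values(): colors.append(value[1])
-- then the three-way membership chain.
def get_bubble_color (details : List (String × List (String × String × String))) : String :=
  let colors : List String := details.foldl (fun colors airport =>
    let values := (PySem.Dict.mk (((PySem.Dict.mk details).get? airport.1).getD [])).values
    values.foldl (fun cs value => cs ++ [value.2]) colors) []
  if colors.contains "high" then "high"
  else if colors.contains "medium" then "medium"
  else "low"

-- ===== PORT B =====
-- rank.get(value[1], 0) for the literal dict {'high': 2, 'medium': 1}
def pvRankGet (s : String) : Int :=
  (PySem.Dict.mk [("high", (2:Int)), ("medium", 1)]).getD s 0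

-- best = max(genexpr over the same nested values, default=0); then ('low','medium','high')[best]
def get_bubble_color_alt (details : List (String × List (String × String × String))) : String :=
  let best : Int := details.foldl (fun m airport =>
    ((PySem.Dict.mk (((PySem.Dict.mk details).get? airport.1).getD [])).values).foldl
      (fun m value => max m (pvRankGet value.2)) m) 0
  (PySem.List.pyGet? ["low", "medium", "high"] best).getD ""

-- ===== PRECONDITION & SPEC =====
def Spec_get_bubble_color (details : List (String × List (String × String × String))) (out : String) : Prop := out = get_bubble_color_alt details
instance (details : List (String × List (String × String × String))) (out : String) : Decidable (Spec_get_bubble_color details out) := by unfold Spec_get_bubble_color; infer_instance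

-- ===== CLAIM (what is proved, stated in full; the proofs are below) =====
def Claim_equal_get_bubble_color : Prop := ∀ (details : List (String × List (String × String × String))), Dom_get_bubble_color details → Spec_get_bubble_color details (get_bubble_color details)

-- ===== LEMMAS AND PROOFS =====

lemma pvRankGet_high : pvRankGet "high" = 2 := by decide
lemma pvRankGet_medium : pvRankGet "medium" = 1 := by decide
lemma pvRankGet_eq_zero (s : String) (hh : s ≠ "high") (hm : s ≠ "medium") : pvRankGet s = 0 := by
  have h1 : ("high" == s) = false := by simpa using Ne.symm hh
  have h2 : ("medium" == s) = false := by simpa using Ne.symm hm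
  simp [pvRankGet, PySem.Dict.getD, PySem.Dict.get?, List.find?, h1, h2]

-- invariant: B's running max is exactly the rank of the best tag in A's accumulated colors list
def pvInv (cs : List String) (m : Int) : Prop :=
  m = (if cs.contains "high" then (2:Int) else if cs.contains "medium" then 1 else 0)

lemma pvInv_inner (vs : List (String × String)) (cs : List String) (m : Int)
    (h : pvInv cs m) :
    pvInv (vs.foldl (fun cs value => cs ++ [value.2]) cs)
      (vs.foldl (fun m value => max m (pvRankGet value.2)) m) := by
  induction vs generalizing cs m with
  | nil => exact h
  | cons v vs ih =>
    simp only [List.foldl_cons]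
    apply ih
    unfold pvInv at h ⊢
    subst h
    by_cases hh : v.2 = "high"
    · simp_all [pvRankGet_high]
      split_ifs <;> simp
    · by_cases hm : v.2 = "medium"
      · simp_all [pvRankGet_medium]
        split_ifs <;> simp_all
      · simp_all [pvRankGet_eq_zero v.2 hh hm]
        split_ifs <;> simp_all

lemma pvInv_outer (details : List (String × List (String × String × String)))
    (l : List (String × List (String × String × String)))
    (cs : List String) (m : Int) (h : pvInv cs m) :
    pvInv (l.foldl (fun colors airport =>
        ((PySem.Dict.mk (((PySem.Dict.mk details).get? airport.1).getD [])).values).foldl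
          (fun cs value => cs ++ [value.2]) colors) cs)
      (l.foldl (fun m airport =>
        ((PySem.Dict.mk (((PySem.Dict.mk details).get? airport.1).getD [])).values).foldl
          (fun m value => max m (pvRankGet value.2)) m) m) := by
  induction l generalizing cs m with
  | nil => exact h
  | cons a l ih =>
    simp only [List.foldl_cons]
    exact ih _ _ (pvInv_inner _ _ _ h)

-- ===== VERDICT (by name: the statement is the Claim_ definition above) =====
theorem get_bubble_color_spec : Claim_equal_get_bubble_color := by
  intro details _
  unfold Spec_get_bubble_color get_bubble_color get_bubble_color_alt
  have h := pvInv_outer details details [] 0 (by unfold pvInv; rfl)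
  unfold pvInv at h
  simp only [h]
  split_ifs <;> rfl
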